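-- pv_equiv track=rewrite | github.com/IrishBoy/HW1 | funcs.py | check_change
-- ===== SOURCE A (Python) =====
-- def count_dic(account):
--     summ_now = 0
--     for cash in account:
--         summ_now += cash * account[cash]
--     return(summ_now)
--
-- def count_change(credit, price, coins):
--     change_for_now = credit - price
--     cur_change = {}
--     for coin in coins:
--         coin_now = coin
--         cur_change_am = change_for_now // coin
--         if cur_change_am >= coins[coin]:
--             cur_change_am = coins[coin]
--             change_for_now -= coin * cur_change_am
--             cur_change[coin_now] = cur_change.get(coin_now, cur_change_am)
--         else:
--             change_for_now -= coin * cur_change_am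
--             cur_change[coin_now] = cur_change.get(coin_now, cur_change_am)
--     return(cur_change)
--
-- def check_change(credit, prices, am, change):
--     flag_av_c = 0
--     for price in prices:
--         if am[price]:
--             now_chahge = count_change(credit, prices[price], change)
--             if count_dic(now_chahge) == credit - prices[price]:
--                 flag_av_c += 1
--     return(flag_av_c)
-- ===== SOURCE B (Python) =====
-- def check_change(credit, prices, am, change):
--     # Count occurrences of each distinct change target among purchasable items,
--     # then run the greedy coin loop once per distinct target.
--     targets = {}
--     for name, price in prices.items():
--         if am[name]:
--             t = credit - price
--             targets[t] = targets.get(t, 0) + 1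
--     total = 0
--     for t, cnt in targets.items():
--         rem = t
--         for coin, avail in change.items():
--             rem -= coin * min(rem // coin, avail)
--         if rem == 0:
--             total += cnt
--     return total
-- ===== Notes on version B (the rewrite author's own statement) =====
-- stated objective: alternative
-- what changed: Replaces the per-price build-a-change-dict-then-re-sum pipeline (count_change + count_dic) by a two-phase algorithm: first group purchasable prices into a counter keyed by the change target credit-price, then run a single scalar-remainder greedy loop once per distinct target and add the counter multiplicity when the remainder reaches 0.
import Mathlib
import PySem

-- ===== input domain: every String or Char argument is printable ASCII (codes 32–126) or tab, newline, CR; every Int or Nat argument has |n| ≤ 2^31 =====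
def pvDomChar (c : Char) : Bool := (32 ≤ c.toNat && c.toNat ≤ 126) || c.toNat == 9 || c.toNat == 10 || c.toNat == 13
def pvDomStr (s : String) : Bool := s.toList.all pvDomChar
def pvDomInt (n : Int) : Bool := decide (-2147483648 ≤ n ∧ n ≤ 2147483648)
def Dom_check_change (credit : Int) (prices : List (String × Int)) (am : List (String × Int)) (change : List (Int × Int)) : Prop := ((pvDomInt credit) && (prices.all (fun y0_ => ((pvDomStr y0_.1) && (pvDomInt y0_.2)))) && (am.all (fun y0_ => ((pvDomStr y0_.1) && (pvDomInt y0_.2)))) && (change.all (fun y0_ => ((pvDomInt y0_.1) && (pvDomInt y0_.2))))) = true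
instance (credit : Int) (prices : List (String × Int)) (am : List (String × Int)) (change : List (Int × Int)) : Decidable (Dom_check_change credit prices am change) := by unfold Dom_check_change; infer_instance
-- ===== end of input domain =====

-- B inlines the greedy change computation to a scalar remainder and groups prices by
-- their change target in a counter, running the greedy loop once per distinct target
-- (objective: alternative decomposition, same results).


-- ===== PORT A =====
def count_dic (account : PySem.Dict Int Int) : Int :=
  account.keys.foldl (fun summ_now cash => summ_now + cash * account.getD cash 0) 0

def count_change (credit price : Int) (coins : PySem.Dict Int Int) : PySem.Dict Int Int :=
  (coins.keys.foldl (fun (st : Int × PySem.Dict Int Int) coin =>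
      let change_for_now := st.1
      let cur_change := st.2
      let coin_now := coin
      let cur_change_am := PySem.Int.floordiv change_for_now coin
      if cur_change_am ≥ coins.getD coin 0 then
        let cur_change_am := coins.getD coin 0
        (change_for_now - coin * cur_change_am,
         cur_change.insert coin_now (cur_change.getD coin_now cur_change_am))
      else
        (change_for_now - coin * cur_change_am,
         cur_change.insert coin_now (cur_change.getD coin_now cur_change_am)))
    (credit - price, PySem.Dict.empty)).2

def check_change (credit : Int) (prices : List (String × Int)) (am : List (String × Int)) (change : List (Int × Int)) : Int :=
  (PySem.Dict.ofList prices).keys.foldl (fun flag_av_c price =>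
      if (PySem.Dict.ofList am).getD price 0 ≠ 0 then
        let now_chahge := count_change credit ((PySem.Dict.ofList prices).getD price 0) (PySem.Dict.ofList change)
        if count_dic now_chahge = credit - (PySem.Dict.ofList prices).getD price 0 then flag_av_c + 1
        else flag_av_c
      else flag_av_c) 0

-- ===== PORT B =====
def check_change_alt (credit : Int) (prices : List (String × Int)) (am : List (String × Int)) (change : List (Int × Int)) : Int :=
  let targets := (PySem.Dict.ofList prices).items.foldl (fun (d : PySem.Dict Int Int) pr =>
      if (PySem.Dict.ofList am).getD pr.1 0 ≠ 0 then
        let t := credit - pr.2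
        d.insert t (d.getD t 0 + 1)
      else d) PySem.Dict.empty
  targets.items.foldl (fun total pr =>
      let rem := (PySem.Dict.ofList change).items.foldl (fun rem cp =>
          rem - cp.1 * min (PySem.Int.floordiv rem cp.1) cp.2) pr.1
      if rem = 0 then total + pr.2 else total) 0

-- ===== PRECONDITION & SPEC =====
-- Pre_ excludes exactly the inputs where Python A raises: a price name missing from am
-- (KeyError), or coin 0 present in change while some listed item is purchasable
-- (ZeroDivisionError). Python B raises the same exceptions on those inputs.
def Pre_check_change (credit : Int) (prices : List (String × Int)) (am : List (String × Int)) (change : List (Int × Int)) : Prop :=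
  ((PySem.Dict.ofList prices).keys.all (fun k => (PySem.Dict.ofList am).contains k) = true
   ∧ ((PySem.Dict.ofList prices).keys.any
        (fun k => decide ((PySem.Dict.ofList am).getD k 0 ≠ 0)) = true
      → (PySem.Dict.ofList change).contains 0 = false))
instance (credit : Int) (prices : List (String × Int)) (am : List (String × Int)) (change : List (Int × Int)) : Decidable (Pre_check_change credit prices am change) := by unfold Pre_check_change; infer_instance

def pvWitness_check_change : Int × (List (String × Int)) × (List (String × Int)) × (List (Int × Int)) :=
  (10, [("a", 3), ("b", 4)], [("a", 1), ("b", 0)], [(5, 1), (2, 1), (1, 3)])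

def Spec_check_change (credit : Int) (prices : List (String × Int)) (am : List (String × Int)) (change : List (Int × Int)) (out : Int) : Prop := out = check_change_alt credit prices am change
instance (credit : Int) (prices : List (String × Int)) (am : List (String × Int)) (change : List (Int × Int)) (out : Int) : Decidable (Spec_check_change credit prices am change out) := by unfold Spec_check_change; infer_instance

-- ===== CLAIM (what is proved, stated in full; the proofs are below) =====
def Claim_equal_check_change : Prop := ∀ (credit : Int) (prices : List (String × Int)) (am : List (String × Int)) (change : List (Int × Int)), Dom_check_change credit prices am change → Pre_check_change credit prices am change → Spec_check_change credit prices am change (check_change credit prices am change)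

-- ===== LEMMAS AND PROOFS =====

-- The scalar greedy remainder B's inner loop computes for a target t.
def greedyRem (changeD : PySem.Dict Int Int) (t : Int) : Int :=
  changeD.items.foldl (fun rem cp => rem - cp.1 * min (PySem.Int.floordiv rem cp.1) cp.2) t

-- B's greedy step, on a key of the coin dict.
def gstep (coins : PySem.Dict Int Int) (rem coin : Int) : Int :=
  rem - coin * min (PySem.Int.floordiv rem coin) (coins.getD coin 0)

-- One step of A's count_change loop (definitionally the lambda in count_change).
def Astep (coins : PySem.Dict Int Int) (st : Int × PySem.Dict Int Int) (coin : Int) : Int × PySem.Dict Int Int :=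
  let change_for_now := st.1
  let cur_change := st.2
  let coin_now := coin
  let cur_change_am := PySem.Int.floordiv change_for_now coin
  if cur_change_am ≥ coins.getD coin 0 then
    let cur_change_am := coins.getD coin 0
    (change_for_now - coin * cur_change_am,
     cur_change.insert coin_now (cur_change.getD coin_now cur_change_am))
  else
    (change_for_now - coin * cur_change_am,
     cur_change.insert coin_now (cur_change.getD coin_now cur_change_am))

lemma Astep_eq (coins : PySem.Dict Int Int) (st : Int × PySem.Dict Int Int) (coin : Int) :
    Astep coins st coin =
      (st.1 - coin * min (PySem.Int.floordiv st.1 coin) (coins.getD coin 0),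
       st.2.insert coin (st.2.getD coin (min (PySem.Int.floordiv st.1 coin) (coins.getD coin 0)))) := by
  unfold Astep
  by_cases h : PySem.Int.floordiv st.1 coin ≥ coins.getD coin 0
  · simp only [if_pos h, min_eq_right h]
  · simp only [if_neg h, min_eq_left (le_of_lt (not_le.mp h))]

lemma greedyRem_eq_keys (d : PySem.Dict Int Int) (hnd : d.keys.Nodup) (t : Int) :
    greedyRem d t = d.keys.foldl (gstep d) t := by
  unfold greedyRem
  rw [PySem.Dict.items_eq_map_keys d hnd 0, List.foldl_map]
  rfl

lemma count_dic_eq (d : PySem.Dict Int Int) (hnd : d.keys.Nodup) :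
    count_dic d = (d.items.map (fun p => p.1 * p.2)).sum := by
  unfold count_dic
  rw [PySem.List.foldl_add, PySem.Dict.items_eq_map_keys d hnd 0, List.map_map, zero_add]
  rfl

lemma count_dic_insert (d : PySem.Dict Int Int) (k a : Int) (hnd : d.keys.Nodup)
    (h : d.contains k = false) :
    count_dic (d.insert k a) = count_dic d + k * a := by
  rw [count_dic_eq d hnd, count_dic_eq _ (PySem.Dict.nodup_keys_insert d k a hnd),
      PySem.Dict.items_insert_of_not_contains d a h]
  simp

lemma cc_loop (coins : PySem.Dict Int Int) (ks : List Int) (cfn : Int) (cur : PySem.Dict Int Int)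
    (hk : ks.Nodup) (hnd : cur.keys.Nodup) (hf : ∀ k ∈ ks, cur.contains k = false) :
    count_dic (ks.foldl (Astep coins) (cfn, cur)).2
      = count_dic cur + (cfn - (ks.foldl (Astep coins) (cfn, cur)).1)
    ∧ (ks.foldl (Astep coins) (cfn, cur)).1 = ks.foldl (gstep coins) cfn := by
  induction ks generalizing cfn cur with
  | nil => simp
  | cons c ks ih =>
    have hc : cur.contains c = false := hf c List.mem_cons_self
    have hgd : cur.getD c (min (PySem.Int.floordiv cfn c) (coins.getD c 0))
        = min (PySem.Int.floordiv cfn c) (coins.getD c 0) :=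
      PySem.Dict.getD_of_not_contains cur _ hc
    simp only [List.foldl_cons, Astep_eq, hgd]
    set m := min (PySem.Int.floordiv cfn c) (coins.getD c 0) with hm
    have hk' : ks.Nodup := (List.nodup_cons.mp hk).2
    have hcn : c ∉ ks := (List.nodup_cons.mp hk).1
    have hnd' : (cur.insert c m).keys.Nodup := PySem.Dict.nodup_keys_insert cur c m hnd
    have hf' : ∀ k ∈ ks, (cur.insert c m).contains k = false := by
      intro k hkmem
      rw [PySem.Dict.contains_insert]
      have hne : ¬ (k = c) := fun h => hcn (h ▸ hkmem)
      simp [hne, hf k (List.mem_cons_of_mem _ hkmem)]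
    obtain ⟨h1, h2⟩ := ih (cfn - c * m) (cur.insert c m) hk' hnd' hf'
    refine ⟨?_, ?_⟩
    · rw [h1, count_dic_insert cur c m hnd hc]; ring
    · rw [h2]; rfl

lemma count_change_char (credit p : Int) (coins : PySem.Dict Int Int) (hnd : coins.keys.Nodup) :
    (count_dic (count_change credit p coins) = credit - p)
      ↔ greedyRem coins (credit - p) = 0 := by
  have hcc : count_change credit p coins
      = (coins.keys.foldl (Astep coins) (credit - p, PySem.Dict.empty)).2 := rfl
  obtain ⟨h1, h2⟩ := cc_loop coins coins.keys (credit - p) PySem.Dict.empty hnd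
    PySem.Dict.nodup_keys_empty (fun k _ => PySem.Dict.contains_empty k)
  rw [hcc, h1, greedyRem_eq_keys coins hnd, ← h2]
  have hz : count_dic PySem.Dict.empty = 0 := rfl
  rw [hz]
  omega

lemma A_eq (credit : Int) (prices : List (String × Int)) (am : List (String × Int)) (change : List (Int × Int)) :
    check_change credit prices am change
      = ((PySem.Dict.ofList prices).items.countP (fun pr =>
          decide ((PySem.Dict.ofList am).getD pr.1 0 ≠ 0)
          && decide (greedyRem (PySem.Dict.ofList change) (credit - pr.2) = 0)) : Int) := by
  have hnd : (PySem.Dict.ofList change).keys.Nodup := PySem.Dict.nodup_keys_ofList change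
  have hpnd : (PySem.Dict.ofList prices).keys.Nodup := PySem.Dict.nodup_keys_ofList prices
  have hA : check_change credit prices am change
      = (PySem.Dict.ofList prices).keys.foldl (fun flag_av_c price =>
          if (PySem.Dict.ofList am).getD price 0 ≠ 0 then
            if count_dic (count_change credit ((PySem.Dict.ofList prices).getD price 0) (PySem.Dict.ofList change))
                = credit - (PySem.Dict.ofList prices).getD price 0 then flag_av_c + 1
            else flag_av_c
          else flag_av_c) 0 := rfl
  have hbody : (fun (flag_av_c : Int) (price : String) =>
          if (PySem.Dict.ofList am).getD price 0 ≠ 0 then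
            if count_dic (count_change credit ((PySem.Dict.ofList prices).getD price 0) (PySem.Dict.ofList change))
                = credit - (PySem.Dict.ofList prices).getD price 0 then flag_av_c + 1
            else flag_av_c
          else flag_av_c)
      = (fun (flag_av_c : Int) (price : String) =>
          if ((PySem.Dict.ofList am).getD price 0 ≠ 0
              ∧ greedyRem (PySem.Dict.ofList change) (credit - (PySem.Dict.ofList prices).getD price 0) = 0)
          then flag_av_c + 1 else flag_av_c) := by
    funext flag price
    by_cases h1 : (PySem.Dict.ofList am).getD price 0 ≠ 0
    · by_cases h2 : greedyRem (PySem.Dict.ofList change) (credit - (PySem.Dict.ofList prices).getD price 0) = 0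
      · rw [if_pos h1, if_pos ((count_change_char credit _ _ hnd).mpr h2), if_pos ⟨h1, h2⟩]
      · rw [if_pos h1, if_neg (fun hc => h2 ((count_change_char credit _ _ hnd).mp hc)),
            if_neg (fun hc => h2 hc.2)]
    · rw [if_neg h1, if_neg (fun hc => h1 hc.1)]
  rw [hA, hbody, PySem.List.foldl_ite_add_one, zero_add]
  have hkeys : (PySem.Dict.ofList prices).keys = (PySem.Dict.ofList prices).items.map (·.1) := rfl
  rw [hkeys, List.countP_map]
  congr 1
  apply List.countP_congr
  intro pr hpr
  have hv : (PySem.Dict.ofList prices).getD pr.1 0 = pr.2 := by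
    have hm : (pr.1, pr.2) ∈ (PySem.Dict.ofList prices).items := hpr
    exact PySem.Dict.getD_of_mem_items _ hm hpnd 0
  simp [Function.comp, hv]

lemma sum_indicator (x c : Int) (ds : List Int) (hnd : ds.Nodup) (hx : x ∈ ds) :
    (ds.map (fun t => if t = x then c else 0)).sum = c := by
  induction ds with
  | nil => cases hx
  | cons a ds ih =>
    by_cases hax : a = x
    · subst hax
      have han : a ∉ ds := (List.nodup_cons.mp hnd).1
      have hz : (ds.map (fun t => if t = a then c else 0)).sum = 0 := by
        apply List.sum_eq_zero
        intro y hy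
        obtain ⟨t, ht, rfl⟩ := List.mem_map.mp hy
        have hne : ¬ t = a := fun hh => han (hh ▸ ht)
        simp [hne]
      simp [hz]
    · have hxds : x ∈ ds := by
        rcases List.mem_cons.mp hx with h | h
        · exact absurd h.symm hax
        · exact h
      simp [hax, ih (List.nodup_cons.mp hnd).2 hxds]

lemma map_count_sum (P : Int → Prop) [DecidablePred P] (ts ds : List Int)
    (hnd : ds.Nodup) (hsub : ∀ t ∈ ts, t ∈ ds) :
    (ds.map (fun t => if P t then (ts.count t : Int) else 0)).sum
      = (ts.countP (fun t => decide (P t)) : Int) := by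
  induction ts with
  | nil => simp
  | cons x ts ih =>
    have hsub' : ∀ t ∈ ts, t ∈ ds := fun t ht => hsub t (List.mem_cons_of_mem _ ht)
    have hxd : x ∈ ds := hsub x List.mem_cons_self
    have hsplit : ∀ t : Int, (if P t then ((x :: ts).count t : Int) else 0)
        = (if P t then (ts.count t : Int) else 0)
          + (if t = x then (if P x then (1:Int) else 0) else 0) := by
      intro t
      by_cases htx : t = x
      · subst htx
        rw [List.count_cons_self]
        by_cases hpt : P t
        · simp only [if_pos hpt]
          push_cast
          ring
        · simp [hpt]
      · have hxe : ¬ x = t := fun h => htx h.symm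
        have hcnt : (x :: ts).count t = ts.count t := by
          rw [List.count_cons]
          simp [hxe]
        rw [hcnt]
        simp [htx]
    calc (ds.map (fun t => if P t then ((x :: ts).count t : Int) else 0)).sum
        = (ds.map (fun t => (if P t then (ts.count t : Int) else 0)
            + (if t = x then (if P x then (1:Int) else 0) else 0))).sum := by
          exact congrArg List.sum (List.map_congr_left (fun t _ => hsplit t))
      _ = (ds.map (fun t => if P t then (ts.count t : Int) else 0)).sum
            + (ds.map (fun t => if t = x then (if P x then (1:Int) else 0) else 0)).sum :=
          List.sum_map_add
      _ = (ts.countP (fun t => decide (P t)) : Int) + (if P x then (1:Int) else 0) := by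
          rw [ih hsub', sum_indicator x _ ds hnd hxd]
      _ = ((x :: ts).countP (fun t => decide (P t)) : Int) := by
          rw [List.countP_cons]
          by_cases hpx : P x
          · simp only [hpx, decide_true]
            push_cast
            ring
          · simp [hpx]

lemma B_eq (credit : Int) (prices : List (String × Int)) (am : List (String × Int)) (change : List (Int × Int)) :
    check_change_alt credit prices am change
      = ((((PySem.Dict.ofList prices).items.filter (fun pr =>
            decide ((PySem.Dict.ofList am).getD pr.1 0 ≠ 0))).map (fun pr => credit - pr.2)).countP
          (fun t => decide (greedyRem (PySem.Dict.ofList change) t = 0)) : Int) := by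
  have hB : check_change_alt credit prices am change
      = ((PySem.Dict.ofList prices).items.foldl (fun (d : PySem.Dict Int Int) pr =>
          if (PySem.Dict.ofList am).getD pr.1 0 ≠ 0 then
            d.insert (credit - pr.2) (d.getD (credit - pr.2) 0 + 1)
          else d) PySem.Dict.empty).items.foldl (fun total pr =>
          if greedyRem (PySem.Dict.ofList change) pr.1 = 0 then total + pr.2 else total) 0 := rfl
  rw [hB, PySem.List.foldl_ite_eq_foldl_filter
        (fun pr : String × Int => (PySem.Dict.ofList am).getD pr.1 0 ≠ 0)
        (fun (d : PySem.Dict Int Int) pr => d.insert (credit - pr.2) (d.getD (credit - pr.2) 0 + 1))]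
  set fprs := (PySem.Dict.ofList prices).items.filter (fun pr =>
      decide ((PySem.Dict.ofList am).getD pr.1 0 ≠ 0)) with hfprs
  set ts := fprs.map (fun pr => credit - pr.2) with hts
  have hmapped : fprs.foldl (fun (d : PySem.Dict Int Int) pr =>
        d.insert (credit - pr.2) (d.getD (credit - pr.2) 0 + 1)) PySem.Dict.empty
      = ts.foldl (fun (d : PySem.Dict Int Int) t => d.insert t (d.getD t 0 + 1)) PySem.Dict.empty := by
    rw [hts, List.foldl_map]
  rw [hmapped, PySem.Dict.foldl_insert_getD_add_one_eq_counter, PySem.Dict.items_counter,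
      List.foldl_map]
  have hbody : (fun (total : Int) (t : Int) =>
        if greedyRem (PySem.Dict.ofList change) (t, (ts.count t : Int)).1 = 0
        then total + (t, (ts.count t : Int)).2 else total)
      = (fun (total : Int) (t : Int) =>
        total + (if greedyRem (PySem.Dict.ofList change) t = 0 then (ts.count t : Int) else 0)) := by
    funext total t
    by_cases h : greedyRem (PySem.Dict.ofList change) t = 0 <;> simp [h]
  rw [hbody, PySem.List.foldl_add, zero_add]
  exact map_count_sum _ ts _ (PySem.Set.nodup_ofList ts)
    (fun t ht => (PySem.Set.mem_ofList ts t).mpr ht)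

-- ===== VERDICT (by name: the statement is the Claim_ definition above) =====
theorem check_change_spec : Claim_equal_check_change := by
  intro credit prices am change _ _
  unfold Spec_check_change
  rw [A_eq, B_eq, List.countP_map, List.countP_filter]
  apply congrArg
  apply List.countP_congr
  intro pr hpr
  simp [Function.comp, Bool.and_comm]
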